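-- pv_equiv track=rewrite | github.com/aa694849243/leetcode_cj | LCP 41. 黑白翻转棋.py | flipChess
-- ===== SOURCE A (Python) =====
-- from typing import List
-- from copy import deepcopy
--
-- def flipChess(chessboard: List[str]) -> int:
--     dirs = [(1, 0), (-1, 0), (0, 1), (0, -1), (1, 1), (-1, -1), (1, -1), (-1, 1)]
--     R, C = len(chessboard), len(chessboard[0])
--     chessboard = [list(row) for row in chessboard]
--
--     def dfs(board):
--         board_backup = deepcopy(board)
--         res = 0
--         for r in range(R):
--             for c in range(C):
--                 if board[r][c] == '.':
--                     tmp = 0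
--                     board[r][c] = 'X'
--                     tmp += get_white_count(board, r, c)
--                     if tmp != 0:
--                         # tmp += dfs(board)
--                         res = max(res, tmp)
--                     board = deepcopy(board_backup)
--         return res
--
--     def get_white_count(board, r, c):
--         count = 0
--         candidates = []
--         for dr, dc in dirs:
--             nr, nc = r + dr, c + dc
--             tmp_cnt = 0
--             tmp_cnadidates = []
--             while 0 <= nr < R and 0 <= nc < C and board[nr][nc] == 'O':
--                 tmp_cnt += 1
--                 tmp_cnadidates.append((nr, nc))
--                 nr += dr
--                 nc += dc
--             if 0 <= nr < R and 0 <= nc < C and board[nr][nc] == 'X':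
--                 count += tmp_cnt
--                 candidates.extend(tmp_cnadidates)
--         for r, c in candidates:
--             board[r][c] = 'X'
--         for r, c in candidates:
--             count += get_white_count(board, r, c)
--         return count
--
--     return dfs(chessboard)
-- ===== SOURCE B (Python) =====
-- from typing import List
--
-- def flipChess(chessboard: List[str]) -> int:
--     dirs = [(1, 0), (-1, 0), (0, 1), (0, -1), (1, 1), (-1, -1), (1, -1), (-1, 1)]
--     R, C = len(chessboard), len(chessboard[0])
--
--     # maximal run of flippable whites leaving (r, c) along (dr, dc); empty unless it
--     # ends at a cell that is black (originally 'X' or in the overlay)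
--     def capture(black, r, c, dr, dc):
--         run = []
--         nr, nc = r + dr, c + dc
--         while 0 <= nr < R and 0 <= nc < C and chessboard[nr][nc] == 'O' and (nr, nc) not in black:
--             run.append((nr, nc))
--             nr += dr
--             nc += dc
--         if 0 <= nr < R and 0 <= nc < C and (chessboard[nr][nc] == 'X' or (nr, nc) in black):
--             return run
--         return []
--
--     best = 0
--     for r0 in range(R):
--         for c0 in range(C):
--             if chessboard[r0][c0] != '.':
--                 continue
--             # the board is never copied or mutated: `black` is an overlay of cells
--             # that have become black, and the count is its final size minus 1
--             black = [(r0, c0)]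
--             work = [(r0, c0)]
--             while work:
--                 r, c = work.pop(0)
--                 gained = [p for d in dirs for p in capture(black, r, c, d[0], d[1])]
--                 black += gained
--                 work = gained + work
--             best = max(best, len(black) - 1)
--     return best
-- ===== Notes on version B (the rewrite author's own statement) =====
-- stated objective: alternative
-- what changed: A's recursive flip-closure (get_white_count recursing on each flipped cell over a deepcopied mutable char matrix, summing run counts) is replaced by an iterative worklist that never copies or mutates the board: flipped cells are kept in an overlay list over the untouched input strings and the flip count is the final overlay size minus one.
import Mathlib
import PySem

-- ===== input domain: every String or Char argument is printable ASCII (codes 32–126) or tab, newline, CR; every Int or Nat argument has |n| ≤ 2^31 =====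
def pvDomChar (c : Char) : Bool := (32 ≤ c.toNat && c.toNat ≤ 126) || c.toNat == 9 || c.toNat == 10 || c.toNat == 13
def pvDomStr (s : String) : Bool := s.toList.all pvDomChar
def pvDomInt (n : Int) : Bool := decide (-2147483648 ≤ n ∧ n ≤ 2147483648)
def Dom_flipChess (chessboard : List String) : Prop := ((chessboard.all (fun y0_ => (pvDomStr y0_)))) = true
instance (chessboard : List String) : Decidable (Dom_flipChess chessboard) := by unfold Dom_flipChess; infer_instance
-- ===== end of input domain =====

-- B replaces A's recursive flip-closure over a deepcopied mutable char matrix by an iterative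
-- worklist that never copies or mutates the board: flipped cells live in an overlay list over
-- the untouched input strings and the count is the overlay's final size minus one.
-- Both recursions are totalised with an ample fuel bound (proved sufficient below).

-- ===== PORT A =====
def pvDirs : List (Int × Int) := [(1,0),(-1,0),(0,1),(0,-1),(1,1),(-1,-1),(1,-1),(-1,1)]

def pvCell (b : List (List Char)) (r c : Nat) : Char := (b.getD r []).getD c ' '

def pvSetX (b : List (List Char)) (r c : Nat) : List (List Char) :=
  b.set r ((b.getD r []).set c 'X')

def pvFlip (b : List (List Char)) (ps : List (Nat × Nat)) : List (List Char) :=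
  ps.foldl (fun bb p => pvSetX bb p.1 p.2) b

-- number of 'O' cells; drives the fuel bound of both ports
def pvWhite (b : List (List Char)) : Nat := (b.map (fun row => row.count 'O')).sum

-- the inner `while` walk along one direction; fuel R+C+2 exceeds any in-range run length
def pvWalk (b : List (List Char)) (R C : Nat) (dr dc : Int) :
    Int → Int → Nat → List (Nat × Nat) × Int × Int
  | nr, nc, 0 => ([], nr, nc)
  | nr, nc, fuel+1 =>
    if 0 ≤ nr ∧ nr < (R:Int) ∧ 0 ≤ nc ∧ nc < (C:Int) ∧ pvCell b nr.toNat nc.toNat = 'O' then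
      let w := pvWalk b R C dr dc (nr+dr) (nc+dc) fuel
      ((nr.toNat, nc.toNat) :: w.1, w.2)
    else ([], nr, nc)

-- the `for dr, dc in dirs` candidate collection (the run count equals the list length)
def pvScan (b : List (List Char)) (R C : Nat) (r c : Nat) : List (Nat × Nat) :=
  pvDirs.foldl (fun acc d =>
    let w := pvWalk b R C d.1 d.2 ((r:Int) + d.1) ((c:Int) + d.2) (R + C + 2)
    if 0 ≤ w.2.1 ∧ w.2.1 < (R:Int) ∧ 0 ≤ w.2.2 ∧ w.2.2 < (C:Int) ∧
        pvCell b w.2.1.toNat w.2.2.toNat = 'X'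
    then acc ++ w.1 else acc) []

-- A's get_white_count: flip the collected runs, then the recursive `for` loop over the
-- flipped candidates, expressed as one recursion over the pending-candidate list;
-- the fuel argument only totalises the recursion (sufficiency is proved below)
def pvGwc (R C : Nat) : Nat → List (List Char) → List (Nat × Nat) → Nat × List (List Char)
  | 0, b, _ => (0, b)
  | _+1, b, [] => (0, b)
  | fuel+1, b, (r, c) :: rest =>
    let cands := pvScan b R C r c
    let b2 := pvFlip b cands
    let s := pvGwc R C fuel b2 cands
    let t := pvGwc R C fuel s.2 rest
    (cands.length + s.1 + t.1, t.2)

def pvFuel (b : List (List Char)) (R C : Nat) : Nat :=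
  pvWhite b * (8 * (R + C + 2) + 1) + 2

-- dfs: try every empty cell (purity plays the role of deepcopy/restore)
def flipChess (chessboard : List String) : Int :=
  let b0 := chessboard.map (fun s => s.toList)
  let R := b0.length
  let C := (b0.headD []).length
  ((List.range R).foldl (fun res r =>
    (List.range C).foldl (fun res c =>
      if pvCell b0 r c = '.' then
        let tmp := (pvGwc R C (pvFuel b0 R C) (pvSetX b0 r c) [(r, c)]).1
        if tmp ≠ 0 then max res tmp else res
      else res) res) 0 : Nat)

-- ===== PORT B =====
-- B never builds a char matrix: it reads the input strings directly
def pvCellS (cb : List String) (r c : Nat) : Char := ((cb.getD r "").toList).getD c ' '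

def pvWhiteS (cb : List String) : Nat := (cb.map (fun s => s.toList.count 'O')).sum

-- the `while` walk of B's `capture`: whites not yet in the overlay, along one direction
def pvCapRun (cb : List String) (R C : Nat) (black : List (Nat × Nat)) (dr dc : Int) :
    Int → Int → Nat → List (Nat × Nat) × Int × Int
  | nr, nc, 0 => ([], nr, nc)
  | nr, nc, fuel+1 =>
    if 0 ≤ nr ∧ nr < (R:Int) ∧ 0 ≤ nc ∧ nc < (C:Int) ∧ pvCellS cb nr.toNat nc.toNat = 'O'
        ∧ ¬ ((nr.toNat, nc.toNat) ∈ black) then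
      let w := pvCapRun cb R C black dr dc (nr+dr) (nc+dc) fuel
      ((nr.toNat, nc.toNat) :: w.1, w.2)
    else ([], nr, nc)

-- B's `capture`: the run counts only if it stops on a black cell (an 'X' or an overlay cell)
def pvCapture (cb : List String) (R C : Nat) (black : List (Nat × Nat)) (r c : Nat)
    (dr dc : Int) : List (Nat × Nat) :=
  let w := pvCapRun cb R C black dr dc ((r:Int) + dr) ((c:Int) + dc) (R + C + 2)
  if 0 ≤ w.2.1 ∧ w.2.1 < (R:Int) ∧ 0 ≤ w.2.2 ∧ w.2.2 < (C:Int) ∧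
      (pvCellS cb w.2.1.toNat w.2.2.toNat = 'X' ∨ (w.2.1.toNat, w.2.2.toNat) ∈ black)
  then w.1 else []

-- B's list comprehension `[p for d in dirs for p in capture(...)]`
def pvGained (cb : List String) (R C : Nat) (black : List (Nat × Nat)) (r c : Nat) :
    List (Nat × Nat) :=
  pvDirs.flatMap (fun d => pvCapture cb R C black r c d.1 d.2)

-- B's `while work:` loop: pop a cell, collect its captures, grow the overlay and the worklist;
-- the fuel argument only totalises the loop (sufficiency is proved below)
def pvLoop (cb : List String) (R C : Nat) :
    Nat → List (Nat × Nat) → List (Nat × Nat) → List (Nat × Nat)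
  | 0, black, _ => black
  | _+1, black, [] => black
  | fuel+1, black, (r, c) :: rest =>
    let g := pvGained cb R C black r c
    pvLoop cb R C fuel (black ++ g) (g ++ rest)

def flipChess_alt (chessboard : List String) : Int :=
  let R := chessboard.length
  let C := (chessboard.headD "").toList.length
  ((List.range R).foldl (fun best r =>
    (List.range C).foldl (fun best c =>
      if pvCellS chessboard r c = '.' then
        max best ((pvLoop chessboard R C
          (pvWhiteS chessboard * (8 * (R + C + 2) + 1) + 2) [(r, c)] [(r, c)]).length - 1)
      else best) best) 0 : Nat)

-- ===== PRECONDITION & SPEC =====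
-- Python A raises IndexError exactly on the empty board and on boards where some row is
-- shorter than the first row (dfs reads board[r][c] for every c < len(board[0])).
def Pre_flipChess (chessboard : List String) : Prop :=
  chessboard ≠ [] ∧ ∀ s ∈ chessboard, (chessboard.headD "").toList.length ≤ s.toList.length
instance (chessboard : List String) : Decidable (Pre_flipChess chessboard) := by
  unfold Pre_flipChess; infer_instance

def pvWitness_flipChess : List String := [".OX", "XOO", "..."]

def Spec_flipChess (chessboard : List String) (out : Int) : Prop := out = flipChess_alt chessboard
instance (chessboard : List String) (out : Int) : Decidable (Spec_flipChess chessboard out) := by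
  unfold Spec_flipChess; infer_instance

-- ===== CLAIM (what is proved, stated in full; the proofs are below) =====
def Claim_equal_flipChess : Prop := ∀ (chessboard : List String), Dom_flipChess chessboard →
  Pre_flipChess chessboard → Spec_flipChess chessboard (flipChess chessboard)

-- ===== LEMMAS AND PROOFS =====

theorem pvCount_set_le (row : List Char) (c : Nat) :
    (row.set c 'X').count 'O' ≤ row.count 'O' := by
  induction row generalizing c with
  | nil => simp
  | cons a t ih =>
    cases c with
    | zero => simp [List.count_cons]
    | succ m => simp [List.count_cons]; exact ih m

theorem pvCount_set_lt (row : List Char) (c : Nat) (h : row.getD c ' ' = 'O') :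
    (row.set c 'X').count 'O' < row.count 'O' := by
  induction row generalizing c with
  | nil => simp at h
  | cons a t ih =>
    cases c with
    | zero => simp_all
    | succ m =>
      simp only [List.getD] at h
      simp only [List.set, List.count_cons]
      have := ih m h
      omega

theorem pvWhite_set_le (b : List (List Char)) (r c : Nat) :
    pvWhite (pvSetX b r c) ≤ pvWhite b := by
  induction b generalizing r with
  | nil => simp [pvSetX, pvWhite]
  | cons row t ih =>
    cases r with
    | zero =>
      simp only [pvSetX, pvWhite, List.set, List.getD, List.map, List.sum_cons]
      exact Nat.add_le_add_right (pvCount_set_le row c) _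
    | succ m =>
      simp only [pvSetX, pvWhite, List.set, List.getD, List.map, List.sum_cons]
      exact Nat.add_le_add_left (ih m) _

theorem pvWhite_set_lt (b : List (List Char)) (r c : Nat) (h : pvCell b r c = 'O') :
    pvWhite (pvSetX b r c) < pvWhite b := by
  induction b generalizing r with
  | nil => simp [pvCell] at h
  | cons row t ih =>
    cases r with
    | zero =>
      simp only [pvCell, List.getD] at h
      simp only [pvSetX, pvWhite, List.set, List.getD, List.map, List.sum_cons]
      exact Nat.add_lt_add_right (pvCount_set_lt row c h) _
    | succ m =>
      simp only [pvCell, List.getD] at h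
      simp only [pvSetX, pvWhite, List.set, List.getD, List.map, List.sum_cons]
      exact Nat.add_lt_add_left (ih m h) _

theorem pvWhite_flip_le (b : List (List Char)) (ps : List (Nat × Nat)) :
    pvWhite (pvFlip b ps) ≤ pvWhite b := by
  induction ps generalizing b with
  | nil => simp [pvFlip]
  | cons p t ih =>
    simp only [pvFlip, List.foldl]
    exact le_trans (ih (pvSetX b p.1 p.2)) (pvWhite_set_le b p.1 p.2)

theorem pvWalk_mem_O (b : List (List Char)) (R C : Nat) (dr dc : Int) :
    ∀ (fuel : Nat) (nr nc : Int) (p : Nat × Nat),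
      p ∈ (pvWalk b R C dr dc nr nc fuel).1 → pvCell b p.1 p.2 = 'O' := by
  intro fuel
  induction fuel with
  | zero => intro nr nc p hp; simp [pvWalk] at hp
  | succ n ih =>
    intro nr nc p hp
    simp only [pvWalk] at hp
    split at hp
    · rename_i hg
      simp only [List.mem_cons] at hp
      rcases hp with h | h
      · subst h; exact hg.2.2.2.2
      · exact ih _ _ p h
    · simp at hp

theorem pvScan_mem_O (b : List (List Char)) (R C : Nat) (r c : Nat) :
    ∀ p ∈ pvScan b R C r c, pvCell b p.1 p.2 = 'O' := by
  unfold pvScan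
  have step : ∀ (ds : List (Int × Int)) (acc : List (Nat × Nat)),
      (∀ p ∈ acc, pvCell b p.1 p.2 = 'O') →
      ∀ p ∈ ds.foldl (fun acc d =>
        let w := pvWalk b R C d.1 d.2 ((r:Int) + d.1) ((c:Int) + d.2) (R + C + 2)
        if 0 ≤ w.2.1 ∧ w.2.1 < (R:Int) ∧ 0 ≤ w.2.2 ∧ w.2.2 < (C:Int) ∧
            pvCell b w.2.1.toNat w.2.2.toNat = 'X'
        then acc ++ w.1 else acc) acc, pvCell b p.1 p.2 = 'O' := by
    intro ds
    induction ds with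
    | nil => intro acc hacc p hp; exact hacc p hp
    | cons d t ih =>
      intro acc hacc p hp
      refine ih _ ?_ p hp
      intro q hq
      dsimp only at hq
      split at hq
      · rcases List.mem_append.1 hq with h | h
        · exact hacc q h
        · exact pvWalk_mem_O b R C d.1 d.2 _ _ _ q h
      · exact hacc q hq
  exact step pvDirs [] (by simp)

theorem pvWhite_flip_scan_lt (b : List (List Char)) (R C r c : Nat) (p : Nat × Nat)
    (ps : List (Nat × Nat)) (h : pvScan b R C r c = p :: ps) :
    pvWhite (pvFlip b (pvScan b R C r c)) < pvWhite b := by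
  rw [h]
  have hO : pvCell b p.1 p.2 = 'O' := pvScan_mem_O b R C r c p (by rw [h]; exact List.mem_cons_self)
  calc pvWhite (pvFlip (pvSetX b p.1 p.2) ps) ≤ pvWhite (pvSetX b p.1 p.2) :=
        pvWhite_flip_le _ ps
    _ < pvWhite b := pvWhite_set_lt b p.1 p.2 hO

-- run-length bounds: the fuel bounds every collected run
theorem pvWalk_len (b : List (List Char)) (R C : Nat) (dr dc : Int) :
    ∀ (fuel : Nat) (nr nc : Int), (pvWalk b R C dr dc nr nc fuel).1.length ≤ fuel := by
  intro fuel
  induction fuel with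
  | zero => intro nr nc; simp [pvWalk]
  | succ n ih =>
    intro nr nc
    simp only [pvWalk]
    split
    · simpa using Nat.succ_le_succ (ih (nr+dr) (nc+dc))
    · simp

theorem pvScan_len (b : List (List Char)) (R C : Nat) (r c : Nat) :
    (pvScan b R C r c).length ≤ 8 * (R + C + 2) := by
  unfold pvScan
  have step : ∀ (ds : List (Int × Int)) (acc : List (Nat × Nat)),
      (ds.foldl (fun acc d =>
        let w := pvWalk b R C d.1 d.2 ((r:Int) + d.1) ((c:Int) + d.2) (R + C + 2)
        if 0 ≤ w.2.1 ∧ w.2.1 < (R:Int) ∧ 0 ≤ w.2.2 ∧ w.2.2 < (C:Int) ∧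
            pvCell b w.2.1.toNat w.2.2.toNat = 'X'
        then acc ++ w.1 else acc) acc).length ≤ acc.length + ds.length * (R + C + 2) := by
    intro ds
    induction ds with
    | nil => intro acc; simp
    | cons d t ih =>
      intro acc
      refine le_trans (ih _) ?_
      dsimp only
      split
      · have hw := pvWalk_len b R C d.1 d.2 (R + C + 2) ((r:Int) + d.1) ((c:Int) + d.2)
        have hmul : (t.length + 1) * (R + C + 2) = t.length * (R + C + 2) + (R + C + 2) := by
          ring
        simp only [List.length_append, List.length_cons]
        omega
      · have hmul : (t.length + 1) * (R + C + 2) = t.length * (R + C + 2) + (R + C + 2) := by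
          ring
        simp only [List.length_cons]
        omega
  have := step pvDirs []
  simpa [pvDirs] using this

theorem pvGwc_white_le (R C : Nat) :
    ∀ (f : Nat) (b : List (List Char)) (L : List (Nat × Nat)),
      pvWhite (pvGwc R C f b L).2 ≤ pvWhite b := by
  intro f
  induction f with
  | zero => intro b L; exact le_of_eq rfl
  | succ n ih =>
    intro b L
    cases L with
    | nil => exact le_refl _
    | cons x rest =>
      obtain ⟨r, c⟩ := x
      rw [pvGwc]
      exact le_trans (ih _ rest) (le_trans (ih _ _) (pvWhite_flip_le b _))

-- A's worklist recursion linearised: a proof-only middle form between pvGwc and pvLoop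
def pvRun (R C : Nat) : List (List Char) → List (Nat × Nat) → Nat
  | _, [] => 0
  | b, (r, c) :: rest =>
    let cands := pvScan b R C r c
    cands.length + pvRun R C (pvFlip b cands) (cands ++ rest)
termination_by b L => (pvWhite b, L.length)
decreasing_by
  rcases hc : pvScan b R C r c with _ | ⟨p, ps⟩
  · right
    simp
  · left
    exact hc ▸ pvWhite_flip_scan_lt b R C r c p ps hc

-- the linear worklist equals A's recursion (for sufficient fuel), threading the board left to right
theorem pvRun_eq_gwc (R C n : Nat) :
    ∀ (L1 : List (Nat × Nat)) (b : List (List Char)), pvWhite b ≤ n →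
      ∀ (L2 : List (Nat × Nat)) (f : Nat),
        pvWhite b * (8 * (R + C + 2) + 1) + L1.length < f →
        pvRun R C b (L1 ++ L2) = (pvGwc R C f b L1).1 + pvRun R C (pvGwc R C f b L1).2 L2 := by
  induction n using Nat.strong_induction_on with
  | _ n IH =>
    intro L1
    induction L1 with
    | nil =>
      intro b hb L2 f hf
      cases f with
      | zero => omega
      | succ f => simp [pvGwc]
    | cons x t IHt =>
      intro b hb L2 f hf
      obtain ⟨r, c⟩ := x
      cases f with
      | zero => omega
      | succ f =>
      have e1 : pvRun R C b ((r,c) :: (t ++ L2)) =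
          (pvScan b R C r c).length +
            pvRun R C (pvFlip b (pvScan b R C r c)) (pvScan b R C r c ++ (t ++ L2)) := by
        rw [pvRun]
      have e2 : pvGwc R C (f+1) b ((r,c) :: t) =
          ((pvScan b R C r c).length +
            (pvGwc R C f (pvFlip b (pvScan b R C r c)) (pvScan b R C r c)).1 +
            (pvGwc R C f (pvGwc R C f (pvFlip b (pvScan b R C r c)) (pvScan b R C r c)).2 t).1,
           (pvGwc R C f (pvGwc R C f (pvFlip b (pvScan b R C r c)) (pvScan b R C r c)).2 t).2) := by
        rw [pvGwc]
      have hlen : (pvScan b R C r c).length ≤ 8 * (R + C + 2) := pvScan_len b R C r c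
      have hW2le : pvWhite (pvFlip b (pvScan b R C r c)) ≤ pvWhite b := pvWhite_flip_le b _
      rcases hl : pvScan b R C r c with _ | ⟨p, ps⟩
      · -- no candidate: the board is unchanged and only the rest of the list remains
        rw [List.cons_append, e1, e2, hl]
        have hb2 : pvFlip b ([] : List (Nat × Nat)) = b := rfl
        have hA : pvGwc R C f b ([] : List (Nat × Nat)) = (0, b) := by
          cases f with
          | zero =>
            simp only [List.length_cons] at hf
            omega
          | succ f => rfl
        rw [List.nil_append, List.length_nil, hb2, hA]
        have hf' : pvWhite b * (8 * (R + C + 2) + 1) + t.length < f := by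
          simp only [List.length_cons] at hf; omega
        have := IHt b hb L2 f hf'
        simp only at this ⊢
        omega
      · have hW2lt : pvWhite (pvFlip b (pvScan b R C r c)) < pvWhite b :=
          pvWhite_flip_scan_lt b R C r c p ps hl
        rw [← hl] at *
        have hchild : pvWhite (pvFlip b (pvScan b R C r c)) * (8 * (R + C + 2) + 1) +
            (pvScan b R C r c).length < f := by
          rcases Nat.exists_eq_add_of_lt hW2lt with ⟨k, hk⟩
          have hmul : pvWhite b * (8 * (R + C + 2) + 1) =
              pvWhite (pvFlip b (pvScan b R C r c)) * (8 * (R + C + 2) + 1) +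
              (k + 1) * (8 * (R + C + 2) + 1) := by
            rw [hk]; ring
          have hone : 8 * (R + C + 2) + 1 ≤ (k + 1) * (8 * (R + C + 2) + 1) :=
            Nat.le_mul_of_pos_left _ (by omega)
          simp only [List.length_cons] at hf
          omega
        have h1 := IH (pvWhite (pvFlip b (pvScan b R C r c))) (lt_of_lt_of_le hW2lt hb)
          (pvScan b R C r c) (pvFlip b (pvScan b R C r c)) le_rfl (t ++ L2) f hchild
        have hWs : pvWhite (pvGwc R C f (pvFlip b (pvScan b R C r c)) (pvScan b R C r c)).2
            ≤ pvWhite (pvFlip b (pvScan b R C r c)) := pvGwc_white_le R C f _ _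
        have hmul2 : pvWhite (pvGwc R C f (pvFlip b (pvScan b R C r c)) (pvScan b R C r c)).2 *
            (8 * (R + C + 2) + 1) ≤ pvWhite b * (8 * (R + C + 2) + 1) :=
          Nat.mul_le_mul_right _ (le_trans hWs hW2le)
        have h2 := IH (pvWhite (pvFlip b (pvScan b R C r c))) (lt_of_lt_of_le hW2lt hb)
          t (pvGwc R C f (pvFlip b (pvScan b R C r c)) (pvScan b R C r c)).2
          (le_trans hWs le_rfl) L2 f
          (by simp only [List.length_cons] at hf; omega)
        rw [List.cons_append, e1, e2, h1, h2]
        simp only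
        omega

theorem pvGetD_mem (b : List (List Char)) (r : Nat) (h : r < b.length) : b.getD r [] ∈ b := by
  rw [List.getD_eq_getElem b [] h]
  exact List.getElem_mem h

theorem pvCell_map (cb : List String) (r c : Nat) :
    pvCell (cb.map (fun s => s.toList)) r c = pvCellS cb r c := by
  unfold pvCell pvCellS
  rcases h : cb[r]? with _ | s <;>
    simp [List.getD_eq_getElem?_getD, List.getElem?_map, h]

theorem pvCell_setX_ne (b : List (List Char)) (q1 q2 r c : Nat) (h : ¬ (r = q1 ∧ c = q2)) :
    pvCell (pvSetX b q1 q2) r c = pvCell b r c := by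
  unfold pvCell pvSetX
  by_cases hr : r = q1
  · subst hr
    have hc : (q2 = c) → False := fun h' => h ⟨rfl, h'.symm⟩
    by_cases hlt : r < b.length
    · simp [List.getD_eq_getElem?_getD, List.getElem?_set, hlt]
      rw [if_neg hc]
    · have hnone : b[r]? = none := List.getElem?_eq_none (by omega)
      simp [List.getD_eq_getElem?_getD, List.getElem?_set, hlt, hnone]
  · simp [List.getD_eq_getElem?_getD, List.getElem?_set, (show q1 ≠ r from fun h' => hr h'.symm)]

theorem pvCell_flip_not_mem (b : List (List Char)) (black : List (Nat × Nat)) (r c : Nat)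
    (h : ¬ ((r, c) ∈ black)) : pvCell (pvFlip b black) r c = pvCell b r c := by
  induction black generalizing b with
  | nil => rfl
  | cons q rest ih =>
    simp only [List.mem_cons, not_or] at h
    have : pvFlip b (q :: rest) = pvFlip (pvSetX b q.1 q.2) rest := rfl
    rw [this, ih _ h.2, pvCell_setX_ne]
    intro hrc
    exact h.1 (by cases q; simp_all)

theorem pvCapRun_mem (cb : List String) (R C : Nat) (black : List (Nat × Nat)) (dr dc : Int) :
    ∀ (fuel : Nat) (nr nc : Int) (p : Nat × Nat),
      p ∈ (pvCapRun cb R C black dr dc nr nc fuel).1 →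
        pvCellS cb p.1 p.2 = 'O' ∧ ¬ (p ∈ black) ∧ p.1 < R ∧ p.2 < C := by
  intro fuel
  induction fuel with
  | zero => intro nr nc p hp; simp [pvCapRun] at hp
  | succ n ih =>
    intro nr nc p hp
    simp only [pvCapRun] at hp
    split at hp
    · rename_i hg
      simp only [List.mem_cons] at hp
      rcases hp with h | h
      · subst h
        exact ⟨hg.2.2.2.2.1, hg.2.2.2.2.2, by omega, by omega⟩
      · exact ih _ _ p h
    · simp at hp

theorem pvGained_mem (cb : List String) (R C : Nat) (black : List (Nat × Nat)) (r c : Nat) :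
    ∀ p ∈ pvGained cb R C black r c,
      pvCellS cb p.1 p.2 = 'O' ∧ ¬ (p ∈ black) ∧ p.1 < R ∧ p.2 < C := by
  intro p hp
  rcases List.mem_flatMap.1 hp with ⟨d, _, hpc⟩
  simp only [pvCapture] at hpc
  split at hpc
  · exact pvCapRun_mem cb R C black d.1 d.2 _ _ _ p hpc
  · simp at hpc

theorem pvCapRun_len (cb : List String) (R C : Nat) (black : List (Nat × Nat)) (dr dc : Int) :
    ∀ (fuel : Nat) (nr nc : Int), (pvCapRun cb R C black dr dc nr nc fuel).1.length ≤ fuel := by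
  intro fuel
  induction fuel with
  | zero => intro nr nc; simp [pvCapRun]
  | succ n ih =>
    intro nr nc
    simp only [pvCapRun]
    split
    · simpa using Nat.succ_le_succ (ih (nr+dr) (nc+dc))
    · simp

theorem pvGained_len (cb : List String) (R C : Nat) (black : List (Nat × Nat)) (r c : Nat) :
    (pvGained cb R C black r c).length ≤ 8 * (R + C + 2) := by
  unfold pvGained
  have cap : ∀ d : Int × Int, (pvCapture cb R C black r c d.1 d.2).length ≤ R + C + 2 := by
    intro d
    simp only [pvCapture]
    split
    · exact pvCapRun_len cb R C black d.1 d.2 (R + C + 2) _ _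
    · simp
  have step : ∀ (ds : List (Int × Int)),
      (ds.flatMap (fun d => pvCapture cb R C black r c d.1 d.2)).length
        ≤ ds.length * (R + C + 2) := by
    intro ds
    induction ds with
    | nil => simp
    | cons d t ih =>
      simp only [List.flatMap_cons, List.length_append, List.length_cons]
      have hcd := cap d
      have hmul : (t.length + 1) * (R + C + 2) = t.length * (R + C + 2) + (R + C + 2) := by
        ring
      omega
  have := step pvDirs
  simpa [pvDirs] using this

theorem pvFlip_append (b : List (List Char)) (x y : List (Nat × Nat)) :
    pvFlip b (x ++ y) = pvFlip (pvFlip b x) y := by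
  simp [pvFlip, List.foldl_append]

theorem pvWhite_flip_gained_lt (cb : List String) (R C : Nat) (black : List (Nat × Nat))
    (r c : Nat) (p : Nat × Nat) (ps : List (Nat × Nat))
    (h : pvGained cb R C black r c = p :: ps) :
    pvWhite (pvFlip (cb.map (fun s => s.toList)) (black ++ pvGained cb R C black r c)) <
      pvWhite (pvFlip (cb.map (fun s => s.toList)) black) := by
  obtain ⟨hO, hnb, -, -⟩ :=
    pvGained_mem cb R C black r c p (by rw [h]; exact List.mem_cons_self)
  rw [pvFlip_append, h]
  have hover : pvCell (pvFlip (cb.map (fun s => s.toList)) black) p.1 p.2 = 'O' := by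
    rw [pvCell_flip_not_mem _ _ _ _ hnb, pvCell_map]; exact hO
  calc pvWhite (pvFlip (pvSetX (pvFlip (cb.map (fun s => s.toList)) black) p.1 p.2) ps)
      ≤ pvWhite (pvSetX (pvFlip (cb.map (fun s => s.toList)) black) p.1 p.2) :=
        pvWhite_flip_le _ ps
    _ < _ := pvWhite_set_lt _ p.1 p.2 hover

theorem pvCell_setX_self (b : List (List Char)) (r c : Nat)
    (hr : r < b.length) (hc : c < (b.getD r []).length) :
    pvCell (pvSetX b r c) r c = 'X' := by
  unfold pvCell pvSetX
  have hb : b[r]? = some b[r] := List.getElem?_eq_getElem hr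
  have hc' : c < b[r].length := by simpa [List.getD_eq_getElem?_getD, hb] using hc
  simp [List.getD_eq_getElem?_getD, List.getElem?_set, hr, hc']

-- the overlay reading rule: a flipped board reads 'X' on the overlay and the original elsewhere
theorem pvCell_flip (b : List (List Char)) (C : Nat) (black : List (Nat × Nat))
    (hrow : ∀ row ∈ b, C ≤ row.length)
    (hb : ∀ q ∈ black, q.1 < b.length ∧ q.2 < C) (r c : Nat) :
    pvCell (pvFlip b black) r c = if (r, c) ∈ black then 'X' else pvCell b r c := by
  induction black generalizing b with
  | nil => simp [pvFlip]
  | cons q rest ih =>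
    obtain ⟨q1, q2⟩ := q
    have hq := hb (q1, q2) List.mem_cons_self
    have step : pvFlip b ((q1, q2) :: rest) = pvFlip (pvSetX b q1 q2) rest := rfl
    have hrow' : ∀ row ∈ pvSetX b q1 q2, C ≤ row.length := by
      intro row hmem
      rcases List.mem_or_eq_of_mem_set hmem with h | h
      · exact hrow row h
      · subst h
        rw [List.length_set]
        exact hrow _ (pvGetD_mem b q1 hq.1)
    have hb' : ∀ p ∈ rest, p.1 < (pvSetX b q1 q2).length ∧ p.2 < C := by
      intro p hp
      have := hb p (List.mem_cons_of_mem _ hp)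
      simpa [pvSetX, List.length_set] using this
    rw [step, ih _ hrow' hb']
    by_cases hmem : (r, c) ∈ rest
    · simp [hmem]
    · simp only [hmem, if_neg, List.mem_cons]
      by_cases heq : (r, c) = (q1, q2)
      · obtain ⟨h1, h2⟩ := Prod.mk.injEq .. ▸ heq
        subst h1; subst h2
        have hclen : c < (b.getD r []).length :=
          lt_of_lt_of_le hq.2 (hrow _ (pvGetD_mem b r hq.1))
        simp [heq, pvCell_setX_self b r c hq.1 hclen, hmem]
      · rw [pvCell_setX_ne b q1 q2 r c (by intro h; exact heq (by simp [h.1, h.2]))]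
        simp [heq, hmem]

-- the combined reading rule for B's original-plus-overlay representation
theorem pvCell_overlay (cb : List String) (R C : Nat) (black : List (Nat × Nat))
    (hR : R = cb.length) (hrow : ∀ s ∈ cb, C ≤ s.toList.length)
    (hb : ∀ q ∈ black, q.1 < R ∧ q.2 < C) (r c : Nat) :
    pvCell (pvFlip (cb.map (fun s => s.toList)) black) r c
      = if (r, c) ∈ black then 'X' else pvCellS cb r c := by
  rw [pvCell_flip (cb.map (fun s => s.toList)) C black
    (by intro row hmem; rcases List.mem_map.1 hmem with ⟨s, hs, hrow'⟩; exact hrow' ▸ hrow s hs)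
    (by intro q hq; simpa [List.length_map, ← hR] using hb q hq), pvCell_map]

-- B's walk is A's walk on the flipped board
theorem pvCapRun_eq (cb : List String) (R C : Nat) (black : List (Nat × Nat))
    (hR : R = cb.length) (hrow : ∀ s ∈ cb, C ≤ s.toList.length)
    (hb : ∀ q ∈ black, q.1 < R ∧ q.2 < C) (dr dc : Int) :
    ∀ (fuel : Nat) (nr nc : Int),
      pvCapRun cb R C black dr dc nr nc fuel =
        pvWalk (pvFlip (cb.map (fun s => s.toList)) black) R C dr dc nr nc fuel := by
  intro fuel
  induction fuel with
  | zero => intro nr nc; simp [pvCapRun, pvWalk]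
  | succ n ih =>
    intro nr nc
    have hcell := pvCell_overlay cb R C black hR hrow hb nr.toNat nc.toNat
    have hiff : (0 ≤ nr ∧ nr < (R:Int) ∧ 0 ≤ nc ∧ nc < (C:Int) ∧
          pvCell (pvFlip (cb.map (fun s => s.toList)) black) nr.toNat nc.toNat = 'O')
        ↔ (0 ≤ nr ∧ nr < (R:Int) ∧ 0 ≤ nc ∧ nc < (C:Int) ∧
          pvCellS cb nr.toNat nc.toNat = 'O' ∧ ¬ ((nr.toNat, nc.toNat) ∈ black)) := by
      constructor
      · rintro ⟨h1, h2, h3, h4, h5⟩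
        refine ⟨h1, h2, h3, h4, ?_⟩
        rw [hcell] at h5
        split at h5
        · exact absurd h5 (by decide)
        · exact ⟨h5, by assumption⟩
      · rintro ⟨h1, h2, h3, h4, h5, h6⟩
        exact ⟨h1, h2, h3, h4, by rw [hcell, if_neg h6]; exact h5⟩
    simp only [pvCapRun, pvWalk]
    by_cases hg : 0 ≤ nr ∧ nr < (R:Int) ∧ 0 ≤ nc ∧ nc < (C:Int) ∧
        pvCellS cb nr.toNat nc.toNat = 'O' ∧ ¬ ((nr.toNat, nc.toNat) ∈ black)
    · rw [if_pos hg, if_pos (hiff.mpr hg), ih]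
    · rw [if_neg hg, if_neg (fun h => hg (hiff.mp h))]

-- B's comprehension over `capture` is A's candidate scan on the flipped board
theorem pvGained_eq (cb : List String) (R C : Nat) (black : List (Nat × Nat))
    (hR : R = cb.length) (hrow : ∀ s ∈ cb, C ≤ s.toList.length)
    (hb : ∀ q ∈ black, q.1 < R ∧ q.2 < C) (r c : Nat) :
    pvGained cb R C black r c
      = pvScan (pvFlip (cb.map (fun s => s.toList)) black) R C r c := by
  unfold pvGained pvScan
  have hstep : ∀ (acc : List (Nat × Nat)), ∀ d ∈ pvDirs,
      (fun acc (d : Int × Int) =>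
        have w := pvWalk (pvFlip (cb.map (fun s => s.toList)) black) R C d.1 d.2
          ((r:Int) + d.1) ((c:Int) + d.2) (R + C + 2)
        if 0 ≤ w.2.1 ∧ w.2.1 < (R:Int) ∧ 0 ≤ w.2.2 ∧ w.2.2 < (C:Int) ∧
            pvCell (pvFlip (cb.map (fun s => s.toList)) black) w.2.1.toNat w.2.2.toNat = 'X'
        then acc ++ w.1 else acc) acc d
        = acc ++ pvCapture cb R C black r c d.1 d.2 := by
    intro acc d _
    have hw := pvCapRun_eq cb R C black hR hrow hb d.1 d.2 (R + C + 2)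
      ((r:Int) + d.1) ((c:Int) + d.2)
    dsimp only
    rw [← hw]
    unfold pvCapture
    have hcell := pvCell_overlay cb R C black hR hrow hb
      (pvCapRun cb R C black d.1 d.2 ((r:Int) + d.1) ((c:Int) + d.2) (R + C + 2)).2.1.toNat
      (pvCapRun cb R C black d.1 d.2 ((r:Int) + d.1) ((c:Int) + d.2) (R + C + 2)).2.2.toNat
    by_cases hmem : ((pvCapRun cb R C black d.1 d.2 ((r:Int) + d.1) ((c:Int) + d.2)
        (R + C + 2)).2.1.toNat,
        (pvCapRun cb R C black d.1 d.2 ((r:Int) + d.1) ((c:Int) + d.2) (R + C + 2)).2.2.toNat)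
        ∈ black
    · simp only [hcell, hmem, if_pos, iff_true, or_true]
      split_ifs with h1 h2 h2 <;> simp_all
    · simp only [hcell, hmem, if_neg, or_false]
      split_ifs with h1 h2 h2 <;> simp_all
  exact Eq.symm ((PySem.List.foldl_congr_mem _ _ _ [] hstep).trans
    (by rw [PySem.List.foldl_append_eq_flatMap]; rfl))

-- the overlay worklist grows by exactly A's flip count (for sufficient fuel)
theorem pvLoop_length (cb : List String) (R C : Nat) (hR : R = cb.length)
    (hrow : ∀ s ∈ cb, C ≤ s.toList.length) :
    ∀ (fuel : Nat) (black st : List (Nat × Nat)),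
      (∀ q ∈ black, q.1 < R ∧ q.2 < C) →
      pvWhite (pvFlip (cb.map (fun s => s.toList)) black) * (8 * (R + C + 2) + 1) + st.length
        < fuel →
      (pvLoop cb R C fuel black st).length
        = black.length + pvRun R C (pvFlip (cb.map (fun s => s.toList)) black) st := by
  intro fuel
  induction fuel with
  | zero => intro black st hb hf; omega
  | succ fuel ih =>
    intro black st hb hf
    cases st with
    | nil => rw [pvLoop, pvRun]; omega
    | cons x rest =>
      obtain ⟨r, c⟩ := x
      have hg := pvGained_eq cb R C black hR hrow hb r c
      have hb' : ∀ q ∈ black ++ pvGained cb R C black r c, q.1 < R ∧ q.2 < C := by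
        intro q hq
        rcases List.mem_append.1 hq with h | h
        · exact hb q h
        · exact (pvGained_mem cb R C black r c q h).2.2
      have hlen : (pvGained cb R C black r c).length ≤ 8 * (R + C + 2) :=
        pvGained_len cb R C black r c
      have hWle : pvWhite (pvFlip (cb.map (fun s => s.toList)) (black ++ pvGained cb R C black r c))
          ≤ pvWhite (pvFlip (cb.map (fun s => s.toList)) black) := by
        rw [pvFlip_append]
        exact pvWhite_flip_le _ _
      have hf' : pvWhite (pvFlip (cb.map (fun s => s.toList))
            (black ++ pvGained cb R C black r c)) * (8 * (R + C + 2) + 1) +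
            (pvGained cb R C black r c ++ rest).length < fuel := by
        rcases hgl : pvGained cb R C black r c with _ | ⟨p, ps⟩
        · rw [List.append_nil, List.nil_append]
          simp only [List.length_cons] at hf
          omega
        · rw [← hgl]
          have hWlt := pvWhite_flip_gained_lt cb R C black r c p ps hgl
          rcases Nat.exists_eq_add_of_lt hWlt with ⟨k, hk⟩
          have hmul : pvWhite (pvFlip (cb.map (fun s => s.toList)) black) *
              (8 * (R + C + 2) + 1) =
              pvWhite (pvFlip (cb.map (fun s => s.toList))
                (black ++ pvGained cb R C black r c)) *
              (8 * (R + C + 2) + 1) + (k + 1) * (8 * (R + C + 2) + 1) := by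
            rw [hk]; ring
          have hone : 8 * (R + C + 2) + 1 ≤ (k + 1) * (8 * (R + C + 2) + 1) :=
            Nat.le_mul_of_pos_left _ (by omega)
          simp only [List.length_append, List.length_cons] at hf ⊢
          omega
      rw [pvLoop, ih _ _ hb' hf', List.length_append, pvFlip_append, hg, pvRun]
      omega

-- ===== VERDICT =====
theorem flipChess_spec : Claim_equal_flipChess := by
  intro cb _ hpre
  obtain ⟨hne, hrowpre⟩ := hpre
  unfold Spec_flipChess
  simp only [flipChess, flipChess_alt]
  have hR : (cb.map (fun s => s.toList)).length = cb.length := by simp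
  have hC : ((cb.map (fun s => s.toList)).headD []).length = (cb.headD "").toList.length := by
    cases cb <;> simp
  have hWS : pvWhiteS cb = pvWhite (cb.map (fun s => s.toList)) := by
    simp [pvWhiteS, pvWhite, List.map_map, Function.comp_def]
  rw [hR, hC]
  congr 1
  apply PySem.List.foldl_congr_mem
  intro res r hr
  apply PySem.List.foldl_congr_mem
  intro res c hc
  rw [List.mem_range] at hr hc
  rw [pvCell_map]
  by_cases hdot : pvCellS cb r c = '.'
  · rw [if_pos hdot, if_pos hdot]
    have hb1 : ∀ q ∈ ([(r, c)] : List (Nat × Nat)),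
        q.1 < cb.length ∧ q.2 < (cb.headD "").toList.length := by
      intro q hq
      simp only [List.mem_singleton] at hq
      subst hq
      omega
    have hflip1 : pvFlip (cb.map (fun s => s.toList)) [(r, c)]
        = pvSetX (cb.map (fun s => s.toList)) r c := rfl
    have hWle : pvWhite (pvSetX (cb.map (fun s => s.toList)) r c)
        ≤ pvWhite (cb.map (fun s => s.toList)) := pvWhite_set_le _ r c
    have hmul : pvWhite (pvSetX (cb.map (fun s => s.toList)) r c) *
        (8 * (cb.length + (cb.headD "").toList.length + 2) + 1)
        ≤ pvWhite (cb.map (fun s => s.toList)) *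
        (8 * (cb.length + (cb.headD "").toList.length + 2) + 1) :=
      Nat.mul_le_mul_right _ hWle
    have hlen := pvLoop_length cb cb.length ((cb.headD "").toList.length) rfl hrowpre
      (pvWhiteS cb * (8 * (cb.length + (cb.headD "").toList.length + 2) + 1) + 2)
      [(r, c)] [(r, c)] hb1
      (by rw [hWS, hflip1]; simp only [List.length_cons, List.length_nil]; omega)
    rw [hflip1] at hlen
    have hrg : pvRun cb.length ((cb.headD "").toList.length)
          (pvSetX (cb.map (fun s => s.toList)) r c) [(r, c)]
        = (pvGwc cb.length ((cb.headD "").toList.length)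
          (pvFuel (cb.map (fun s => s.toList)) cb.length ((cb.headD "").toList.length))
          (pvSetX (cb.map (fun s => s.toList)) r c) [(r, c)]).1 := by
      have hm := pvRun_eq_gwc cb.length ((cb.headD "").toList.length)
        (pvWhite (pvSetX (cb.map (fun s => s.toList)) r c)) [(r, c)]
        (pvSetX (cb.map (fun s => s.toList)) r c) le_rfl []
        (pvFuel (cb.map (fun s => s.toList)) cb.length ((cb.headD "").toList.length))
        (by unfold pvFuel; simp only [List.length_cons, List.length_nil]; omega)
      have h0 : pvRun cb.length ((cb.headD "").toList.length)
          (pvGwc cb.length ((cb.headD "").toList.length)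
            (pvFuel (cb.map (fun s => s.toList)) cb.length ((cb.headD "").toList.length))
            (pvSetX (cb.map (fun s => s.toList)) r c) [(r, c)]).2 [] = 0 := by rw [pvRun]
      rw [List.append_nil] at hm
      omega
    rw [hlen, hrg]
    set tmp := (pvGwc cb.length ((cb.headD "").toList.length)
      (pvFuel (cb.map (fun s => s.toList)) cb.length ((cb.headD "").toList.length))
      (pvSetX (cb.map (fun s => s.toList)) r c) [(r, c)]).1 with htmp
    by_cases h2 : tmp = 0
    · simp [h2]
    · simp [h2]
  · rw [if_neg hdot, if_neg hdot]
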